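-- pv_equiv track=rewrite | github.com/aztech-eng/public-health-rag-assistant | scripts/compare_repos.py | build_architectural_differences
-- ===== SOURCE A (Python) =====
-- from typing import Callable, Dict, Iterable, List, Sequence
--
-- def build_architectural_differences(changed: Sequence[str], only_in_b: Sequence[str]) -> List[str]:
--     scope = list(changed) + list(only_in_b)
--     diffs = ["Public Health RAG Assistant is structured as a production-style extension of the MVP."]
--
--     if any(p.startswith("evaluation/") for p in scope):
--         diffs.append("Adds a first-class evaluation subsystem (`evaluation/`, benchmark artifacts, score reports).")
--     if any(p.startswith("api/") for p in scope):
--         diffs.append("Adds/expands API-serving boundaries (`api/`) beyond CLI-only experimentation.")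
--     if any(p == "rag_mvp/retrieval.py" or "hybrid" in p.lower() for p in scope):
--         diffs.append("Retrieval architecture evolves from baseline retrieval to hybrid/vector-aware retrieval flows.")
--     if any("llm" in p.lower() or "answering" in p.lower() for p in scope):
--         diffs.append("Answering architecture emphasizes grounded LLM behavior with safer abstention patterns.")
--     return diffs
-- ===== SOURCE B (Python) =====
-- def build_architectural_differences(changed, only_in_b):
--     has_eval = has_api = has_retr = has_llm = False
--     for p in list(changed) + list(only_in_b):
--         pl = p.lower()
--         has_eval = has_eval or p.startswith("evaluation/")
--         has_api = has_api or p.startswith("api/")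
--         has_retr = has_retr or p == "rag_mvp/retrieval.py" or "hybrid" in pl
--         has_llm = has_llm or "llm" in pl or "answering" in pl
--     diffs = ["Public Health RAG Assistant is structured as a production-style extension of the MVP."]
--     if has_eval:
--         diffs.append("Adds a first-class evaluation subsystem (`evaluation/`, benchmark artifacts, score reports).")
--     if has_api:
--         diffs.append("Adds/expands API-serving boundaries (`api/`) beyond CLI-only experimentation.")
--     if has_retr:
--         diffs.append("Retrieval architecture evolves from baseline retrieval to hybrid/vector-aware retrieval flows.")
--     if has_llm:
--         diffs.append("Answering architecture emphasizes grounded LLM behavior with safer abstention patterns.")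
--     return diffs
-- ===== Notes on version B (the rewrite author's own statement) =====
-- stated objective: alternative
-- what changed: Replaces four separate early-exiting any() scans over scope with a single pass maintaining four boolean flags, lowercasing each path once instead of up to three times, then emits the guarded messages from the flags.
import Mathlib
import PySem

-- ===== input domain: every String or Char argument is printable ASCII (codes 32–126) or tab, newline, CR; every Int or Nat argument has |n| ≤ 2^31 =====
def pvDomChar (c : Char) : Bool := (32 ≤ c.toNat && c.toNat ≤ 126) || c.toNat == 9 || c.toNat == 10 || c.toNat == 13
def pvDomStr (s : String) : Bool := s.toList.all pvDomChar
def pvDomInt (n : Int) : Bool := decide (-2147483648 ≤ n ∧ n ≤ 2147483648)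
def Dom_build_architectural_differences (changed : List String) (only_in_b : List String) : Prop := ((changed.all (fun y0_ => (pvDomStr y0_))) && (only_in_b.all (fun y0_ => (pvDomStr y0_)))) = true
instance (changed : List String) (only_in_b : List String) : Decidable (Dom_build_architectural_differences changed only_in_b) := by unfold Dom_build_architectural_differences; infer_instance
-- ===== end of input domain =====

-- B replaces A's four separate any() scans over scope with a single pass keeping four boolean flags (one lower() per path); same output, an alternative decomposition (no speed claim).
-- ===== PORT A =====
def build_architectural_differences (changed : List String) (only_in_b : List String) : List String :=
  let scope := changed ++ only_in_b
  let diffs := ["Public Health RAG Assistant is structured as a production-style extension of the MVP."]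
  let diffs := if scope.any (fun p => PySem.Str.startswith p "evaluation/") then
      diffs ++ ["Adds a first-class evaluation subsystem (`evaluation/`, benchmark artifacts, score reports)."] else diffs
  let diffs := if scope.any (fun p => PySem.Str.startswith p "api/") then
      diffs ++ ["Adds/expands API-serving boundaries (`api/`) beyond CLI-only experimentation."] else diffs
  let diffs := if scope.any (fun p => p == "rag_mvp/retrieval.py" || PySem.Str.isIn "hybrid" (PySem.Str.lower p)) then
      diffs ++ ["Retrieval architecture evolves from baseline retrieval to hybrid/vector-aware retrieval flows."] else diffs
  let diffs := if scope.any (fun p => PySem.Str.isIn "llm" (PySem.Str.lower p) || PySem.Str.isIn "answering" (PySem.Str.lower p)) then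
      diffs ++ ["Answering architecture emphasizes grounded LLM behavior with safer abstention patterns."] else diffs
  diffs

-- ===== PORT B =====
-- B: one pass over scope maintaining four flags, then emit messages from the flags.
def pvStepB (f : Bool × Bool × Bool × Bool) (p : String) : Bool × Bool × Bool × Bool :=
  let pl := PySem.Str.lower p
  (f.1 || PySem.Str.startswith p "evaluation/",
   f.2.1 || PySem.Str.startswith p "api/",
   f.2.2.1 || (p == "rag_mvp/retrieval.py" || PySem.Str.isIn "hybrid" pl),
   f.2.2.2 || (PySem.Str.isIn "llm" pl || PySem.Str.isIn "answering" pl))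

def build_architectural_differences_alt (changed : List String) (only_in_b : List String) : List String :=
  let fl := (changed ++ only_in_b).foldl pvStepB (false, false, false, false)
  ["Public Health RAG Assistant is structured as a production-style extension of the MVP."]
    ++ (if fl.1 then ["Adds a first-class evaluation subsystem (`evaluation/`, benchmark artifacts, score reports)."] else [])
    ++ (if fl.2.1 then ["Adds/expands API-serving boundaries (`api/`) beyond CLI-only experimentation."] else [])
    ++ (if fl.2.2.1 then ["Retrieval architecture evolves from baseline retrieval to hybrid/vector-aware retrieval flows."] else [])
    ++ (if fl.2.2.2 then ["Answering architecture emphasizes grounded LLM behavior with safer abstention patterns."] else [])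

-- ===== PRECONDITION & SPEC =====
def Spec_build_architectural_differences (changed : List String) (only_in_b : List String) (out : List String) : Prop := out = build_architectural_differences_alt changed only_in_b
instance (changed : List String) (only_in_b : List String) (out : List String) : Decidable (Spec_build_architectural_differences changed only_in_b out) := by unfold Spec_build_architectural_differences; infer_instance

-- ===== CLAIM (what is proved, stated in full; the proofs are below) =====
def Claim_equal_build_architectural_differences : Prop := ∀ (changed : List String) (only_in_b : List String), Dom_build_architectural_differences changed only_in_b → Spec_build_architectural_differences changed only_in_b (build_architectural_differences changed only_in_b)

-- ===== LEMMAS AND PROOFS =====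
theorem pvStepB_foldl (l : List String) (f : Bool × Bool × Bool × Bool) :
    l.foldl pvStepB f =
      (f.1 || l.any (fun p => PySem.Str.startswith p "evaluation/"),
       f.2.1 || l.any (fun p => PySem.Str.startswith p "api/"),
       f.2.2.1 || l.any (fun p => p == "rag_mvp/retrieval.py" || PySem.Str.isIn "hybrid" (PySem.Str.lower p)),
       f.2.2.2 || l.any (fun p => PySem.Str.isIn "llm" (PySem.Str.lower p) || PySem.Str.isIn "answering" (PySem.Str.lower p))) := by
  induction l generalizing f with
  | nil => simp
  | cons x xs ih =>
      simp only [List.foldl_cons, List.any_cons, ih, pvStepB, Bool.or_assoc]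

theorem pvEmit (b1 b2 b3 b4 : Bool) (i x1 x2 x3 x4 : String) :
    (let d0 := [i];
     let d1 := if b1 then d0 ++ [x1] else d0;
     let d2 := if b2 then d1 ++ [x2] else d1;
     let d3 := if b3 then d2 ++ [x3] else d2;
     if b4 then d3 ++ [x4] else d3) =
    [i] ++ (if b1 then [x1] else []) ++ (if b2 then [x2] else [])
        ++ (if b3 then [x3] else []) ++ (if b4 then [x4] else []) := by
  cases b1 <;> cases b2 <;> cases b3 <;> cases b4 <;> rfl

-- ===== VERDICT (by name: the statement is the Claim_ definition above) =====
theorem build_architectural_differences_spec : Claim_equal_build_architectural_differences := by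
  intro changed only_in_b _
  show build_architectural_differences changed only_in_b = _
  unfold build_architectural_differences build_architectural_differences_alt
  rw [pvStepB_foldl]
  simp only [Bool.false_or]
  exact pvEmit _ _ _ _ _ _ _ _ _
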